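-- pv_equiv track=rewrite | github.com/contextuai/contextuai-solo | backend/services/workspace/workshop_prompt_builder.py | _build_previous_contributions
-- ===== SOURCE A (Python) =====
-- from typing import Dict, Any, List, Tuple, Optional
--
-- def _build_previous_contributions(
--
--     previous_contributions: List[Dict[str, Any]],
--     current_round: int,
-- ) -> str:
--     """
--     Build the previous contributions section.
--
--     Organizes contributions by round for clarity.
--
--     Args:
--         previous_contributions: List of contribution dicts
--         current_round: Current round number
--
--     Returns:
--         Previous contributions string
--     """
--     if not previous_contributions:
--         return ""
--
--     # Group contributions by round
--     rounds: Dict[int, List[Dict[str, Any]]] = {}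
--     for contribution in previous_contributions:
--         rnd = contribution.get("round_number", 1)
--         if rnd not in rounds:
--             rounds[rnd] = []
--         rounds[rnd].append(contribution)
--
--     lines = ["<previous_contributions>"]
--
--     for rnd in sorted(rounds.keys()):
--         contributions_in_round = rounds[rnd]
--
--         if len(rounds) > 1:
--             lines.append(f"\n--- Round {rnd} ---")
--
--         for contrib in contributions_in_round:
--             agent_name = contrib.get("agent_name", "Unknown Agent")
--             content = contrib.get("content", "")
--
--             # Truncate very long contributions to keep prompt manageable
--             if len(content) > 4000:
--                 content = content[:4000] + "\n...[truncated]..."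
--
--             lines.append(
--                 f"\n<contribution agent=\"{agent_name}\" round=\"{rnd}\">"
--             )
--             lines.append(content)
--             lines.append("</contribution>")
--
--     lines.append("\n</previous_contributions>")
--
--     return "\n".join(lines)
-- ===== SOURCE B (Python) =====
-- def _build_previous_contributions(previous_contributions, current_round):
--     if not previous_contributions:
--         return ""
--     keys = sorted({c.get("round_number", 1) for c in previous_contributions})
--     multi = len(keys) > 1
--     parts = ["<previous_contributions>"]
--     for rnd in keys:
--         if multi:
--             parts.append(f"\n--- Round {rnd} ---")
--         for contrib in previous_contributions:
--             if contrib.get("round_number", 1) != rnd: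
--                 continue
--             content = contrib.get("content", "")
--             if len(content) > 4000:
--                 content = content[:4000] + "\n...[truncated]..."
--             parts.append(f"\n<contribution agent=\"{contrib.get('agent_name', 'Unknown Agent')}\" round=\"{rnd}\">")
--             parts.append(content)
--             parts.append("</contribution>")
--     parts.append("\n</previous_contributions>")
--     return "\n".join(parts)
-- ===== Notes on version B (the rewrite author's own statement) =====
-- stated objective: alternative
-- what changed: B drops A's dict-of-lists round index entirely: it sorts the distinct round keys once (sorted over a set comprehension) and emits each round's blocks by a filtering pass over the original list, trading A's one-pass grouping index for key-driven scans.
import Mathlib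
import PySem

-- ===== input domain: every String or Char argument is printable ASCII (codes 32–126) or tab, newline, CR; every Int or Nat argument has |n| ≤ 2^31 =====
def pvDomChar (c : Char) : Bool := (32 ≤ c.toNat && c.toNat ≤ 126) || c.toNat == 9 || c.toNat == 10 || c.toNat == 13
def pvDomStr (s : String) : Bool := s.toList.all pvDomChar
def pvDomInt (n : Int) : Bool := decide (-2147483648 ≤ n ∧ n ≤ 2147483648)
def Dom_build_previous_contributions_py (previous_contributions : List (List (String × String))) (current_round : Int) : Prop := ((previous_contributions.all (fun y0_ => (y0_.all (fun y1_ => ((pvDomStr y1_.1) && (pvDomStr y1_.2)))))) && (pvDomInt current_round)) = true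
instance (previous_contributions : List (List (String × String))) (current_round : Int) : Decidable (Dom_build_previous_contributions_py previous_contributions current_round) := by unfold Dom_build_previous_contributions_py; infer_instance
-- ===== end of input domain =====

-- B replaces A's dict-of-lists round index with sorted distinct round keys plus a
-- filtering pass per round (objective: alternative decomposition, no speed claim).
-- Round keys are modelled as Option String: none is the int default 1 from
-- contribution.get("round_number", 1), some s a present (string) value; under
-- Pre_ the keys are homogeneous, which is exactly where Python's sorted() returns.

-- contribution.get("round_number", 1): none models the int default 1
def pvKeyOf (c : List (String × String)) : Option String :=
  (PySem.Dict.mk c).get? "round_number"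

-- how key rnd prints inside the f-strings (int 1 prints as "1")
def pvShowKey (rnd : Option String) : String :=
  match rnd with
  | none => "1"
  | some s => s

-- sort key for round keys: injective on every homogeneous key set admitted by Pre_
-- (all none — a single key — or all some of distinct strings), where it orders
-- exactly as Python's sorted() orders the keys; hand-written because Option String
-- carries no order instance.
def pvSortKey (rnd : Option String) : String :=
  match rnd with
  | none => ""
  | some s => s

-- the three lines appended for one contribution (shared f-string text of A and B)
def pvContribLines (rnd : Option String) (contrib : List (String × String)) : List String :=
  let agent_name := (PySem.Dict.mk contrib).getD "agent_name" "Unknown Agent"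
  let content := (PySem.Dict.mk contrib).getD "content" ""
  let content := if 4000 < PySem.Str.len content
    then PySem.Str.slice content none (some 4000) ++ "\n...[truncated]..."
    else content
  ["\n<contribution agent=\"" ++ agent_name ++ "\" round=\"" ++ pvShowKey rnd ++ "\">",
   content, "</contribution>"]

-- ===== PORT A =====
def build_previous_contributions_py (previous_contributions : List (List (String × String))) (current_round : Int) : String :=
  if previous_contributions = [] then ""
  else
    let rounds : PySem.Dict (Option String) (List (List (String × String))) :=
      previous_contributions.foldl (fun rounds contribution =>
        let rnd := pvKeyOf contribution
        let rounds := if !(rounds.contains rnd) then rounds.insert rnd [] else rounds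
        rounds.modify rnd [] (fun l => l ++ [contribution])) (PySem.Dict.mk [])
    let lines := ["<previous_contributions>"]
    let lines := (PySem.List.sorted rounds.keys pvSortKey false).foldl (fun lines rnd =>
      let contributions_in_round := rounds.getD rnd []
      let lines := if 1 < rounds.size then lines ++ ["\n--- Round " ++ pvShowKey rnd ++ " ---"] else lines
      contributions_in_round.foldl (fun lines contrib => lines ++ pvContribLines rnd contrib) lines) lines
    let lines := lines ++ ["\n</previous_contributions>"]
    PySem.Str.join "\n" lines

-- ===== PORT B =====
def build_previous_contributions_py_alt (previous_contributions : List (List (String × String))) (current_round : Int) : String :=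
  if previous_contributions = [] then ""
  else
    let keys := PySem.List.sorted (PySem.Set.ofList (previous_contributions.map pvKeyOf)) pvSortKey false
    let multi := 1 < keys.length
    let parts := ["<previous_contributions>"]
    let parts := keys.foldl (fun parts rnd =>
      let parts := if multi then parts ++ ["\n--- Round " ++ pvShowKey rnd ++ " ---"] else parts
      previous_contributions.foldl (fun parts contrib =>
        if pvKeyOf contrib ≠ rnd then parts
        else parts ++ pvContribLines rnd contrib) parts) parts
    PySem.Str.join "\n" (parts ++ ["\n</previous_contributions>"])

-- ===== PRECONDITION & SPEC =====
-- Pre_ excludes mixed inputs where some contributions carry "round_number" and others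
-- do not: there Python's sorted() compares the int default 1 with a str key and BOTH
-- A and B raise TypeError.
def Pre_build_previous_contributions_py (previous_contributions : List (List (String × String))) (current_round : Int) : Prop :=
  (previous_contributions.all (fun c => (PySem.Dict.mk c).contains "round_number") = true) ∨
  (previous_contributions.all (fun c => !((PySem.Dict.mk c).contains "round_number")) = true)
instance (previous_contributions : List (List (String × String))) (current_round : Int) : Decidable (Pre_build_previous_contributions_py previous_contributions current_round) := by unfold Pre_build_previous_contributions_py; infer_instance

def pvWitness_build_previous_contributions_py : (List (List (String × String))) × Int :=
  ([[("round_number", "1"), ("agent_name", "Ann"), ("content", "hi")],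
    [("round_number", "2"), ("content", "bye")]], 2)

def Spec_build_previous_contributions_py (previous_contributions : List (List (String × String))) (current_round : Int) (out : String) : Prop := out = build_previous_contributions_py_alt previous_contributions current_round
instance (previous_contributions : List (List (String × String))) (current_round : Int) (out : String) : Decidable (Spec_build_previous_contributions_py previous_contributions current_round out) := by unfold Spec_build_previous_contributions_py; infer_instance

-- ===== CLAIM (what is proved, stated in full; the proofs are below) =====
def Claim_equal_build_previous_contributions_py : Prop := ∀ (previous_contributions : List (List (String × String))) (current_round : Int), Dom_build_previous_contributions_py previous_contributions current_round → Pre_build_previous_contributions_py previous_contributions current_round → Spec_build_previous_contributions_py previous_contributions current_round (build_previous_contributions_py previous_contributions current_round)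

-- ===== LEMMAS AND PROOFS =====

-- A's "create empty bucket if absent, then append" step is one Dict.modify
theorem pv_step_eq_modify (d : PySem.Dict (Option String) (List (List (String × String))))
    (c : List (String × String)) :
    ((if !(d.contains (pvKeyOf c)) then d.insert (pvKeyOf c) [] else d).modify (pvKeyOf c) []
      (fun l => l ++ [c])) = d.modify (pvKeyOf c) [] (fun l => l ++ [c]) := by
  by_cases h : d.contains (pvKeyOf c)
  · simp [h]
  · simp only [Bool.not_eq_true] at h
    simp [h, PySem.Dict.modify, PySem.Dict.insert_insert_self, PySem.Dict.getD_insert_self,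
      PySem.Dict.getD_of_not_contains _ _ h]

-- the dict A builds: its buckets are filters of the input
theorem pv_rounds_getD (pcs : List (List (String × String))) (k : Option String) :
    (pcs.foldl (fun rounds contribution =>
        let rnd := pvKeyOf contribution
        let rounds := if !(rounds.contains rnd) then rounds.insert rnd [] else rounds
        rounds.modify rnd [] (fun l => l ++ [contribution])) (PySem.Dict.mk [])).getD k []
      = pcs.filter (fun c => pvKeyOf c == k) := by
  simp only [pv_step_eq_modify]
  have h : pcs.foldl (fun d c => d.modify (pvKeyOf c) [] (fun l => l ++ [c])) (PySem.Dict.mk [])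
      = (pcs.map (fun c => (pvKeyOf c, c))).foldl
          (fun d p => d.modify p.1 [] (fun l => l ++ [p.2])) (PySem.Dict.mk []) := by
    rw [List.foldl_map]
  rw [h, PySem.Dict.getD_foldl_modify_append]
  simp [List.filter_map, List.map_map, Function.comp_def, PySem.Dict.getD, PySem.Dict.get?]

-- the dict A builds: its keys are the distinct round keys in first-occurrence order
theorem pv_rounds_keys (pcs : List (List (String × String))) :
    (pcs.foldl (fun rounds contribution =>
        let rnd := pvKeyOf contribution
        let rounds := if !(rounds.contains rnd) then rounds.insert rnd [] else rounds
        rounds.modify rnd [] (fun l => l ++ [contribution])) (PySem.Dict.mk [])).keys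
      = PySem.Set.ofList (pcs.map pvKeyOf) := by
  simp only [pv_step_eq_modify]
  rw [PySem.Dict.keys_foldl_modify_key pcs pvKeyOf [] (fun _ c l => l ++ [c]) (PySem.Dict.mk [])]
  simp [PySem.Set.update, PySem.Set.ofList_eq_foldl, PySem.Dict.keys]

-- B's inner skip-loop over the whole list is A's loop over the bucket
theorem pv_inner_eq (pcs : List (List (String × String))) (rnd : Option String)
    (acc : List String) :
    pcs.foldl (fun parts contrib =>
        if pvKeyOf contrib ≠ rnd then parts else parts ++ pvContribLines rnd contrib) acc
      = (pcs.filter (fun c => pvKeyOf c == rnd)).foldl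
          (fun parts contrib => parts ++ pvContribLines rnd contrib) acc := by
  rw [show (fun (parts : List String) contrib => if pvKeyOf contrib ≠ rnd then parts else parts ++ pvContribLines rnd contrib)
      = (fun (parts : List String) contrib => if pvKeyOf contrib = rnd then parts ++ pvContribLines rnd contrib else parts) from by
    funext parts contrib; simp only [ne_eq, ite_not]]
  rw [PySem.List.foldl_ite_eq_foldl_filter (fun c => pvKeyOf c = rnd)
      (fun parts contrib => parts ++ pvContribLines rnd contrib) pcs acc]
  congr 1
  exact List.filter_congr (by intro c _; exact Bool.eq_iff_iff.mpr (by simp))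

-- ===== VERDICT (by name: the statement is the Claim_ definition above) =====
theorem build_previous_contributions_py_spec : Claim_equal_build_previous_contributions_py := by
  intro pcs current_round _hdom _hpre
  unfold Spec_build_previous_contributions_py
  unfold build_previous_contributions_py build_previous_contributions_py_alt
  by_cases hnil : pcs = []
  · simp [hnil]
  · simp only [if_neg hnil]
    rw [pv_rounds_keys]
    congr 2
    apply PySem.List.foldl_congr_mem
    intro acc rnd _hmem
    rw [pv_rounds_getD, pv_inner_eq]
    have hsize : (pcs.foldl (fun rounds contribution =>
        let rnd := pvKeyOf contribution
        let rounds := if !(rounds.contains rnd) then rounds.insert rnd [] else rounds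
        rounds.modify rnd [] (fun l => l ++ [contribution])) (PySem.Dict.mk [])).size
        = (PySem.List.sorted (PySem.Set.ofList (pcs.map pvKeyOf)) pvSortKey false).length := by
      rw [PySem.List.length_sorted, ← pv_rounds_keys pcs]
      simp [PySem.Dict.size, PySem.Dict.keys]
    rw [hsize]
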